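-- pv_equiv track=rewrite | github.com/JaraVictoria/SSL | Lexer/automataConstante.py | automata_constante
-- ===== SOURCE A (Python) =====
-- ESTADO_FINAL = "ESTADO ACEPTADO"
--
-- ESTADO_NO_FINAL = "ESTADO NO ACEPTADO"
--
-- ESTADO_TRAMPA = "ESTADO TRAMPA"
--
-- def automata_constante(cadena):
-- 	estado = 0
-- 	estados_finales = [1]
--
-- 	for caracter in cadena:
-- 		if estado == 0 and (caracter == "-" or caracter.isnumeric()): #Lo unico malo que le veo, es que acepta el "-0".
-- 			estado = 1
-- 		elif estado == 1 and caracter.isnumeric():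
-- 			estado = 1
-- 		else:
-- 			estado = -1
-- 			break
--
-- 	if estado == -1:
-- 		return ESTADO_TRAMPA
-- 	if estado in estados_finales:
-- 		return ESTADO_FINAL
-- 	else:
-- 		return ESTADO_NO_FINAL
-- ===== SOURCE B (Python) =====
-- ESTADO_FINAL = "ESTADO ACEPTADO"
-- ESTADO_NO_FINAL = "ESTADO NO ACEPTADO"
-- ESTADO_TRAMPA = "ESTADO TRAMPA"
--
-- def automata_constante(cadena):
--     if not cadena:
--         return ESTADO_NO_FINAL
--     if cadena[0] != "-" and not cadena[0].isnumeric():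
--         return ESTADO_TRAMPA
--     return ESTADO_FINAL if all(c.isnumeric() for c in cadena[1:]) else ESTADO_TRAMPA
-- ===== Notes on version B (the rewrite author's own statement) =====
-- stated objective: simpler
-- what changed: Replaces the threaded DFA state variable and break-driven loop with positional validation: an empty check, a first-character check ('-' or numeric), and an all() scan over the tail.
import Mathlib
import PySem

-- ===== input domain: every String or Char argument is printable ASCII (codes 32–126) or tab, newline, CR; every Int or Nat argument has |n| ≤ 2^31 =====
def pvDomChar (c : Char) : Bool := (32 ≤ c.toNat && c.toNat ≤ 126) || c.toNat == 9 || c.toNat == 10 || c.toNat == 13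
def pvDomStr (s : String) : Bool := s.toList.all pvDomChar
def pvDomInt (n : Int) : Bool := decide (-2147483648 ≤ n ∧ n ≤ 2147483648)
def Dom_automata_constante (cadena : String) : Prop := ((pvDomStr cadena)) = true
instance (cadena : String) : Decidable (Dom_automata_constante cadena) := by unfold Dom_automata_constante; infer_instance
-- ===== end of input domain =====

-- B replaces A's threaded DFA state and break with positional checks (first char, then the tail); objective: simpler.

-- ===== PORT A =====
-- the for-loop with break, threading 'estado'; PySem.Chars.isdigit is exact for .isnumeric() on the ASCII domain
def pvLoopA : List Char → Int → Int
  | [], estado => estado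
  | caracter :: rest, estado =>
    if estado = 0 ∧ (caracter = '-' ∨ PySem.Chars.isdigit caracter) then pvLoopA rest 1
    else if estado = 1 ∧ PySem.Chars.isdigit caracter then pvLoopA rest 1
    else -1  -- break

def automata_constante (cadena : String) : String :=
  let estado := pvLoopA cadena.toList 0
  if estado = -1 then "ESTADO TRAMPA"
  else if estado ∈ ([1] : List Int) then "ESTADO ACEPTADO"
  else "ESTADO NO ACEPTADO"

-- ===== PORT B =====
def automata_constante_alt (cadena : String) : String :=
  match cadena.toList with
  | [] => "ESTADO NO ACEPTADO"
  | c :: rest =>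
    if c ≠ '-' ∧ ¬ PySem.Chars.isdigit c then "ESTADO TRAMPA"
    else if rest.all PySem.Chars.isdigit then "ESTADO ACEPTADO"
    else "ESTADO TRAMPA"

-- ===== PRECONDITION & SPEC =====
def Spec_automata_constante (cadena : String) (out : String) : Prop := out = automata_constante_alt cadena
instance (cadena : String) (out : String) : Decidable (Spec_automata_constante cadena out) := by unfold Spec_automata_constante; infer_instance

-- ===== CLAIM (what is proved, stated in full; the proofs are below) =====
def Claim_equal_automata_constante : Prop := ∀ (cadena : String), Dom_automata_constante cadena → Spec_automata_constante cadena (automata_constante cadena)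

-- ===== LEMMAS AND PROOFS =====
-- once in state 1, A's loop returns 1 iff every remaining character is a digit
theorem pvLoopA_one (rest : List Char) :
    pvLoopA rest 1 = (if rest.all PySem.Chars.isdigit then 1 else -1) := by
  induction rest with
  | nil => simp [pvLoopA]
  | cons c cs ih =>
    by_cases h : PySem.Chars.isdigit c = true
    · simp [pvLoopA, h, ih]
    · simp [pvLoopA, h]

-- ===== VERDICT (by name: the statement is the Claim_ definition above) =====
theorem automata_constante_spec : Claim_equal_automata_constante := by
  intro cadena _
  unfold Spec_automata_constante automata_constante automata_constante_alt
  cases hl : cadena.toList with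
  | nil => simp [pvLoopA]
  | cons c rest =>
    by_cases hfirst : c = '-' ∨ PySem.Chars.isdigit c = true
    · have h0 : ((0:Int) = 0 ∧ (c = '-' ∨ PySem.Chars.isdigit c = true)) := ⟨rfl, hfirst⟩
      rw [pvLoopA]
      rw [if_pos h0]
      rw [pvLoopA_one]
      by_cases hall : rest.all PySem.Chars.isdigit = true
      · simp [hall]
        exact fun hne => hfirst.resolve_left hne
      · simp [hall]
    · push Not at hfirst
      simp [pvLoopA, hfirst]
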